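-- pv_equiv track=rewrite | github.com/hassant727/FYP---Automatic_Decision_Making_For_HUDOC | echr_crawler/spiders/echrr.py | clean_element
-- ===== SOURCE A (Python) =====
-- def clean_element(s, word):
--     str = []
--     i = 0
--     while i < len(s):
--         if s[i].find(word) == -1:
--             str.append(s[i])
--             i += 1
--         else:
--             break
--     return str
-- ===== SOURCE B (Python) =====
-- def clean_element(s, word):
--     cut = len(s)
--     for i in reversed(range(len(s))):
--         if s[i].find(word) != -1:
--             cut = i
--     return s[:cut]
-- ===== Notes on version B (the rewrite author's own statement) =====
-- stated objective: alternative
-- what changed: Replaces the forward while-loop growing an accumulator with two stages: a backwards index pass that records the smallest index whose element contains the word (defaulting to len(s)), then a single slice s[:cut]; no per-element list append, the prefix is produced by one C-level slice.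
import Mathlib
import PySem

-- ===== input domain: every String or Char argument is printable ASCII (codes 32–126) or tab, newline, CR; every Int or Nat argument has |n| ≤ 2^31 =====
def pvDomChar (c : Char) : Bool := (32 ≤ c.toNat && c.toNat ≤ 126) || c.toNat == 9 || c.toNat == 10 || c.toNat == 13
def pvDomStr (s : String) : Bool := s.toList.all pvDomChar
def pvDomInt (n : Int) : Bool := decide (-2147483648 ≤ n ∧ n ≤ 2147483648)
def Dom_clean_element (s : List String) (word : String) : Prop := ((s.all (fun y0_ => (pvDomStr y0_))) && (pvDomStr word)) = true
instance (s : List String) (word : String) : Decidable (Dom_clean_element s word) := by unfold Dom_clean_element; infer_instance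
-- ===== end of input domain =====

-- B replaces the forward while-loop growing an accumulator by two stages:
-- a backwards index pass computing the cut point, then one slice (objective: alternative).

-- ===== PORT A =====
-- Port of A: while-loop with index i and accumulator `str`, appending until a match.
def cleanA_loop (s : List String) (word : String) (i : Nat) (str : List String) :
    List String :=
  if h : i < s.length then
    if PySem.Str.find s[i] word = -1 then
      cleanA_loop s word (i + 1) (str ++ [s[i]])
    else str
  else str
termination_by s.length - i

def clean_element (s : List String) (word : String) : List String :=
  cleanA_loop s word 0 []

-- ===== PORT B =====
-- Port of B: `for i in reversed(range(len(s)))` updating cut, then `s[:cut]`.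
-- `s.getD i ""` is exact here: every i produced by the range is a valid index;
-- `s[:cut]` with 0 ≤ cut ≤ len(s) is `List.take cut`.
def cleanB_cut (s : List String) (word : String) : Nat :=
  ((List.range s.length).reverse).foldl
    (fun cut i => if PySem.Str.find (s.getD i "") word ≠ -1 then i else cut)
    s.length

def clean_element_alt (s : List String) (word : String) : List String :=
  s.take (cleanB_cut s word)

-- ===== PRECONDITION & SPEC =====
def Spec_clean_element (s : List String) (word : String) (out : List String) : Prop := out = clean_element_alt s word
instance (s : List String) (word : String) (out : List String) : Decidable (Spec_clean_element s word out) := by unfold Spec_clean_element; infer_instance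

-- ===== CLAIM (what is proved, stated in full; the proofs are below) =====
def Claim_equal_clean_element : Prop := ∀ (s : List String) (word : String), Dom_clean_element s word → Spec_clean_element s word (clean_element s word)

-- ===== LEMMAS AND PROOFS =====

-- Bool predicate: "element contains word"
def pvQ (word : String) (x : String) : Bool := PySem.Str.find x word != -1

-- the backwards fold computes the first matching index in s.take k (else init)
theorem cut_fold (s : List String) (word : String) :
    ∀ (k : Nat) (init : Nat), k ≤ s.length →
      ((List.range k).reverse).foldl
        (fun cut i => if PySem.Str.find (s.getD i "") word ≠ -1 then i else cut) init
      = (if (s.take k).findIdx (pvQ word) < k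
          then (s.take k).findIdx (pvQ word) else init) := by
  intro k
  induction k with
  | zero => intro init _; simp
  | succ k ih =>
    intro init hk
    have hklt : k < s.length := by omega
    rw [List.range_succ, List.reverse_append]
    simp only [List.reverse_cons, List.reverse_nil, List.nil_append, List.cons_append,
      List.foldl_cons]
    rw [ih _ (by omega)]
    have htake : s.take (k + 1) = s.take k ++ [s[k]] := by
      rw [List.take_add_one, List.getElem?_eq_getElem hklt]; rfl
    have hlen : (s.take k).length = k := List.length_take_of_le (by omega)
    rw [htake, List.findIdx_append, hlen]
    have hget : s.getD k "" = s[k] := List.getD_eq_getElem s "" hklt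
    by_cases hj : (s.take k).findIdx (pvQ word) < k
    · rw [if_pos hj, if_pos hj, if_pos (by omega)]
    · rw [if_neg hj, if_neg hj]
      by_cases hq : PySem.Str.find s[k] word ≠ -1
      · rw [if_pos (by rw [hget]; exact hq)]
        have : (List.findIdx (pvQ word) [s[k]]) = 0 := by
          simp only [PySem.Str.find] at hq
          simp [List.findIdx_cons, pvQ, PySem.Str.find, Bool.cond_eq_ite, bne_iff_ne, hq]
        rw [this]
        simp
      · rw [if_neg (by rw [hget]; exact hq)]
        have : (List.findIdx (pvQ word) [s[k]]) = 1 := by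
          simp only [not_not, PySem.Str.find] at hq
          simp [List.findIdx_cons, pvQ, PySem.Str.find, Bool.cond_eq_ite, hq]
        rw [this, if_neg (by omega)]

-- take-up-to-first-match equals takeWhile of the negated predicate
theorem take_findIdx_eq_takeWhile (word : String) :
    ∀ (l : List String),
      l.take (l.findIdx (pvQ word)) = l.takeWhile (fun x => !(pvQ word x)) := by
  intro l
  induction l with
  | nil => simp
  | cons x t ih =>
    rw [List.findIdx_cons, List.takeWhile_cons]
    by_cases hq : pvQ word x = true
    · simp [hq]
    · simp only [Bool.not_eq_true] at hq
      simp [hq, ih]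

-- loop invariant: A's loop from index i equals acc ++ takeWhile on the dropped tail
theorem loop_eq (s : List String) (word : String) :
    ∀ i acc, cleanA_loop s word i acc
      = acc ++ (s.drop i).takeWhile (fun x => !(pvQ word x)) := by
  intro i
  induction hn : s.length - i using Nat.strong_induction_on generalizing i with
  | _ n ih =>
    intro acc
    unfold cleanA_loop
    split
    · rename_i hlt
      rw [List.drop_eq_getElem_cons hlt, List.takeWhile_cons]
      by_cases hf : PySem.Str.find s[i] word = -1
      · rw [if_pos hf, ih (s.length - (i + 1)) (by omega) (i + 1) rfl]
        have : (!(pvQ word s[i])) = true := by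
          simp only [PySem.Str.find] at hf
          simp [pvQ, PySem.Str.find, hf]
        rw [this]
        simp
      · rw [if_neg hf]
        have : (!(pvQ word s[i])) = false := by
          simp only [PySem.Str.find] at hf
          simp [pvQ, PySem.Str.find, hf]
        rw [this]
        simp
    · rename_i h
      rw [List.drop_eq_nil_of_le (by omega)]
      simp

-- ===== VERDICT (by name: the statement is the Claim_ definition above) =====
theorem clean_element_spec : Claim_equal_clean_element := by
  intro s word _
  unfold Spec_clean_element clean_element clean_element_alt cleanB_cut
  rw [loop_eq, cut_fold s word s.length s.length (le_refl _), List.take_length]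
  by_cases hj : s.findIdx (pvQ word) < s.length
  · rw [if_pos hj, take_findIdx_eq_takeWhile]
    simp
  · rw [if_neg hj]
    have := take_findIdx_eq_takeWhile word s
    rw [List.take_of_length_le (by omega)] at this
    simp [← this]
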